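-- pv_equiv track=rewrite | github.com/Bharath-2002/Agentic-Jewelry-Intelligence-Framework | app/agents/summarizer.py | _determine_vibe_rule_based
-- ===== SOURCE A (Python) =====
-- from typing import Dict, Optional, Any
--
-- def _determine_vibe_rule_based(
--
--     normalized_data: Dict[str, Any],
--     inferred_data: Dict[str, Any]
-- ) -> str:
--     """Determine vibe using rule-based approach."""
--     name = normalized_data.get("name", "").lower()
--     jewel_type = (inferred_data.get("jewelry_type") or normalized_data.get("jewel_type", "")).lower()
--     gemstone = (inferred_data.get("gemstone") or normalized_data.get("gemstone", "")).lower()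
--
--     # Wedding/Engagement indicators
--     if any(word in name for word in ["wedding", "bridal", "engagement"]):
--         return "wedding" if "wedding" in name else "engagement"
--
--     # Ring with diamond is likely engagement
--     if jewel_type == "ring" and "diamond" in gemstone:
--         return "engagement"
--
--     # Festive indicators
--     if any(word in name for word in ["festive", "celebration", "festival"]):
--         return "festive"
--
--     # Formal indicators
--     if any(word in name for word in ["formal", "gala", "elegant", "luxury"]):
--         return "formal"
--
--     # Party indicators
--     if any(word in name for word in ["party", "cocktail", "evening"]):
--         return "party"
--
--     # Date night indicators
--     if any(word in name for word in ["romantic", "date", "evening"]):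
--         return "date-night"
--
--     # Everyday/casual as default
--     if any(word in name for word in ["everyday", "daily", "simple", "minimalist"]):
--         return "everyday"
--
--     return "casual"
-- ===== SOURCE B (Python) =====
-- def _determine_vibe_rule_based(normalized_data, inferred_data):
--     """Reverse-priority overwrite pass: scan rules from weakest to strongest,
--     letting later (stronger) matches overwrite the accumulator; no early returns."""
--     name = normalized_data.get("name", "").lower()
--     jewel_type = (inferred_data.get("jewelry_type") or normalized_data.get("jewel_type", "")).lower()
--     gemstone = (inferred_data.get("gemstone") or normalized_data.get("gemstone", "")).lower()
--
--     # keyword rules in ASCENDING priority: a later hit overwrites an earlier one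
--     LOW = [
--         ("everyday", "everyday"), ("daily", "everyday"),
--         ("simple", "everyday"), ("minimalist", "everyday"),
--         ("romantic", "date-night"), ("date", "date-night"),
--         ("party", "party"), ("cocktail", "party"), ("evening", "party"),
--         ("formal", "formal"), ("gala", "formal"),
--         ("elegant", "formal"), ("luxury", "formal"),
--         ("festive", "festive"), ("celebration", "festive"), ("festival", "festive"),
--     ]
--     HIGH = [
--         ("bridal", "engagement"), ("engagement", "engagement"),
--         ("wedding", "wedding"),
--     ]
--
--     vibe = "casual"
--     for kw, label in LOW:
--         if kw in name:
--             vibe = label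
--     if jewel_type == "ring" and "diamond" in gemstone:
--         vibe = "engagement"
--     for kw, label in HIGH:
--         if kw in name:
--             vibe = label
--     return vibe
-- ===== Notes on version B (the rewrite author's own statement) =====
-- stated objective: alternative
-- what changed: Replaces A's first-match early-return if-cascade with a reverse-priority overwrite pass: B scans keyword rules from weakest (everyday) to strongest (wedding) with no early returns, letting each later match overwrite an accumulator, with the ring+diamond check applied at its priority slot between the two scans.
import Mathlib
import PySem

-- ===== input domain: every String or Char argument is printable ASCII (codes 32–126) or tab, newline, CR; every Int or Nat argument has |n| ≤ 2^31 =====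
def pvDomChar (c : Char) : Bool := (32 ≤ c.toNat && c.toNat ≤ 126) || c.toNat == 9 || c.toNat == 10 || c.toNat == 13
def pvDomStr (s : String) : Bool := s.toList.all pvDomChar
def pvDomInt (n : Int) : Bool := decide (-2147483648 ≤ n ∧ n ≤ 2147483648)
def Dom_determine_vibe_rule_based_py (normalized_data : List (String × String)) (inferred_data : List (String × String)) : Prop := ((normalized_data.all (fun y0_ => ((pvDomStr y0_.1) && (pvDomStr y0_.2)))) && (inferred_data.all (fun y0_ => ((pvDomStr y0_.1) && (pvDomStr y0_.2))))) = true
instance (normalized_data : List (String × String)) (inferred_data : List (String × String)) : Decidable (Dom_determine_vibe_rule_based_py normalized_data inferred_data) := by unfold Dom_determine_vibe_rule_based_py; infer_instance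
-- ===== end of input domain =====

-- B replaces A's first-match early-return cascade by a reverse-priority overwrite pass
-- (weakest rules first, stronger matches overwrite the accumulator); same results, no early returns.

-- ===== PORT A =====
-- x or y for strings: x unless x == "" (values here are strings, never None)
def pyStrOr (x y : String) : String := if x = "" then y else x

def determine_vibe_rule_based_py (normalized_data : List (String × String)) (inferred_data : List (String × String)) : String :=
  let nd : PySem.Dict String String := ⟨normalized_data⟩
  let idd : PySem.Dict String String := ⟨inferred_data⟩
  let name := PySem.Str.lower (nd.getD "name" "")
  let jewel_type := PySem.Str.lower (pyStrOr (idd.getD "jewelry_type" "") (nd.getD "jewel_type" ""))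
  let gemstone := PySem.Str.lower (pyStrOr (idd.getD "gemstone" "") (nd.getD "gemstone" ""))
  if ["wedding", "bridal", "engagement"].any (fun w => PySem.Str.isIn w name) then
    (if PySem.Str.isIn "wedding" name then "wedding" else "engagement")
  else if jewel_type = "ring" && PySem.Str.isIn "diamond" gemstone then "engagement"
  else if ["festive", "celebration", "festival"].any (fun w => PySem.Str.isIn w name) then "festive"
  else if ["formal", "gala", "elegant", "luxury"].any (fun w => PySem.Str.isIn w name) then "formal"
  else if ["party", "cocktail", "evening"].any (fun w => PySem.Str.isIn w name) then "party"
  else if ["romantic", "date", "evening"].any (fun w => PySem.Str.isIn w name) then "date-night"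
  else if ["everyday", "daily", "simple", "minimalist"].any (fun w => PySem.Str.isIn w name) then "everyday"
  else "casual"

-- ===== PORT B =====
-- one overwrite step of Source B's loops: a hit replaces the accumulated vibe
def pvStep (name : String) (vibe : String) (rule : String × String) : String :=
  if PySem.Str.isIn rule.1 name then rule.2 else vibe

-- Source B's LOW table: keyword rules in ASCENDING priority
def pvLow : List (String × String) :=
  [("everyday", "everyday"), ("daily", "everyday"),
   ("simple", "everyday"), ("minimalist", "everyday"),
   ("romantic", "date-night"), ("date", "date-night"),
   ("party", "party"), ("cocktail", "party"), ("evening", "party"),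
   ("formal", "formal"), ("gala", "formal"),
   ("elegant", "formal"), ("luxury", "formal"),
   ("festive", "festive"), ("celebration", "festive"), ("festival", "festive")]

-- Source B's HIGH table
def pvHigh : List (String × String) :=
  [("bridal", "engagement"), ("engagement", "engagement"), ("wedding", "wedding")]

def determine_vibe_rule_based_py_alt (normalized_data : List (String × String)) (inferred_data : List (String × String)) : String :=
  let nd : PySem.Dict String String := ⟨normalized_data⟩
  let idd : PySem.Dict String String := ⟨inferred_data⟩
  let name := PySem.Str.lower (nd.getD "name" "")
  let jewel_type := PySem.Str.lower (pyStrOr (idd.getD "jewelry_type" "") (nd.getD "jewel_type" ""))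
  let gemstone := PySem.Str.lower (pyStrOr (idd.getD "gemstone" "") (nd.getD "gemstone" ""))
  let vibe := pvLow.foldl (pvStep name) "casual"
  let vibe := if jewel_type = "ring" && PySem.Str.isIn "diamond" gemstone then "engagement" else vibe
  pvHigh.foldl (pvStep name) vibe

-- ===== PRECONDITION & SPEC =====
def Spec_determine_vibe_rule_based_py (normalized_data : List (String × String)) (inferred_data : List (String × String)) (out : String) : Prop := out = determine_vibe_rule_based_py_alt normalized_data inferred_data
instance (normalized_data : List (String × String)) (inferred_data : List (String × String)) (out : String) : Decidable (Spec_determine_vibe_rule_based_py normalized_data inferred_data out) := by unfold Spec_determine_vibe_rule_based_py; infer_instance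

-- ===== CLAIM (what is proved, stated in full; the proofs are below) =====
def Claim_equal_determine_vibe_rule_based_py : Prop := ∀ (normalized_data : List (String × String)) (inferred_data : List (String × String)), Dom_determine_vibe_rule_based_py normalized_data inferred_data → Spec_determine_vibe_rule_based_py normalized_data inferred_data (determine_vibe_rule_based_py normalized_data inferred_data)

-- ===== LEMMAS AND PROOFS =====
-- collapse an overwrite chain of 2/3/4 same-label rules into one disjunction
lemma g2 (a1 a2 : Bool) (l v : String) :
    (if a2 then l else if a1 then l else v) = if a1 || a2 then l else v := by
  cases a1 <;> cases a2 <;> rfl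

lemma g3 (a1 a2 a3 : Bool) (l v : String) :
    (if a3 then l else if a2 then l else if a1 then l else v)
      = if a1 || (a2 || a3) then l else v := by
  cases a1 <;> cases a2 <;> cases a3 <;> rfl

lemma g4 (a1 a2 a3 a4 : Bool) (l v : String) :
    (if a4 then l else if a3 then l else if a2 then l else if a1 then l else v)
      = if a1 || (a2 || (a3 || a4)) then l else v := by
  cases a1 <;> cases a2 <;> cases a3 <;> cases a4 <;> rfl

-- first-match cascade vs (collapsed) overwrite pass, over the 12 membership booleans
lemma bool_core (w b e rg fe fo p c ev r d ed : Bool) :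
    (if w || (b || e) then (if w then "wedding" else "engagement")
     else if rg then "engagement"
     else if fe then "festive"
     else if fo then "formal"
     else if p || (c || ev) then "party"
     else if r || (d || ev) then "date-night"
     else if ed then "everyday"
     else "casual")
    =
    (if w then "wedding"
     else if b || e then "engagement"
     else if rg then "engagement"
     else if fe then "festive"
     else if fo then "formal"
     else if p || (c || ev) then "party"
     else if r || d then "date-night"
     else if ed then "everyday"
     else "casual") := by
  cases w <;> cases b <;> cases e <;> cases rg <;> cases fe <;> cases fo <;>
    cases p <;> cases c <;> cases ev <;> cases r <;> cases d <;> cases ed <;> rfl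

-- both cores agree for every name / jewel_type / gemstone
lemma core_eq (name jewel_type gemstone : String) :
    (if ["wedding", "bridal", "engagement"].any (fun w => PySem.Str.isIn w name) then
      (if PySem.Str.isIn "wedding" name then "wedding" else "engagement")
    else if jewel_type = "ring" && PySem.Str.isIn "diamond" gemstone then "engagement"
    else if ["festive", "celebration", "festival"].any (fun w => PySem.Str.isIn w name) then "festive"
    else if ["formal", "gala", "elegant", "luxury"].any (fun w => PySem.Str.isIn w name) then "formal"
    else if ["party", "cocktail", "evening"].any (fun w => PySem.Str.isIn w name) then "party"
    else if ["romantic", "date", "evening"].any (fun w => PySem.Str.isIn w name) then "date-night"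
    else if ["everyday", "daily", "simple", "minimalist"].any (fun w => PySem.Str.isIn w name) then "everyday"
    else "casual")
    =
    (let vibe := pvLow.foldl (pvStep name) "casual"
     let vibe := if jewel_type = "ring" && PySem.Str.isIn "diamond" gemstone then "engagement" else vibe
     pvHigh.foldl (pvStep name) vibe) := by
  simp only [pvLow, pvHigh, List.foldl_cons, List.foldl_nil, pvStep,
    List.any_cons, List.any_nil, Bool.or_false]
  rw [g4 (PySem.Str.isIn "everyday" name) (PySem.Str.isIn "daily" name)
        (PySem.Str.isIn "simple" name) (PySem.Str.isIn "minimalist" name) "everyday" "casual",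
      g2 (PySem.Str.isIn "romantic" name) (PySem.Str.isIn "date" name) "date-night" _,
      g3 (PySem.Str.isIn "party" name) (PySem.Str.isIn "cocktail" name)
        (PySem.Str.isIn "evening" name) "party" _,
      g4 (PySem.Str.isIn "formal" name) (PySem.Str.isIn "gala" name)
        (PySem.Str.isIn "elegant" name) (PySem.Str.isIn "luxury" name) "formal" _,
      g3 (PySem.Str.isIn "festive" name) (PySem.Str.isIn "celebration" name)
        (PySem.Str.isIn "festival" name) "festive" _,
      g2 (PySem.Str.isIn "bridal" name) (PySem.Str.isIn "engagement" name) "engagement" _]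
  exact bool_core _ _ _ _ _ _ _ _ _ _ _ _

-- ===== VERDICT (by name: the statement is the Claim_ definition above) =====
theorem determine_vibe_rule_based_py_spec : Claim_equal_determine_vibe_rule_based_py := by
  intro normalized_data inferred_data _
  unfold Spec_determine_vibe_rule_based_py determine_vibe_rule_based_py determine_vibe_rule_based_py_alt
  exact core_eq _ _ _
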